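-- pv_equiv track=rewrite | github.com/PKU-YuanGroup/MagicTime | utils/dataset.py | _get_frame_indices_adjusted
-- ===== SOURCE A (Python) =====
-- def _get_frame_indices_adjusted(video_length, n_frames):
--     indices = list(range(video_length))
--     additional_frames_needed = n_frames - video_length
--
--     repeat_indices = []
--     for i in range(additional_frames_needed):
--         index_to_repeat = i % video_length
--         repeat_indices.append(indices[index_to_repeat])
--
--     all_indices = indices + repeat_indices
--     all_indices.sort()
--
--     return all_indices
-- ===== SOURCE B (Python) =====
-- def _get_frame_indices_adjusted(video_length, n_frames):
--     extra = n_frames - video_length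
--     if extra <= 0:
--         return list(range(video_length))
--     q, r = divmod(extra, video_length)
--     out = []
--     for i in range(video_length):
--         out.extend([i] * (q + 1 + (1 if i < r else 0)))
--     return out
-- ===== Notes on version B (the rewrite author's own statement) =====
-- stated objective: alternative
-- what changed: B replaces 'materialize range, append extras in a loop, then sort' by a closed-form per-index repeat count via divmod, emitting the already-sorted output directly in one pass with no sort step.
import Mathlib
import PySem

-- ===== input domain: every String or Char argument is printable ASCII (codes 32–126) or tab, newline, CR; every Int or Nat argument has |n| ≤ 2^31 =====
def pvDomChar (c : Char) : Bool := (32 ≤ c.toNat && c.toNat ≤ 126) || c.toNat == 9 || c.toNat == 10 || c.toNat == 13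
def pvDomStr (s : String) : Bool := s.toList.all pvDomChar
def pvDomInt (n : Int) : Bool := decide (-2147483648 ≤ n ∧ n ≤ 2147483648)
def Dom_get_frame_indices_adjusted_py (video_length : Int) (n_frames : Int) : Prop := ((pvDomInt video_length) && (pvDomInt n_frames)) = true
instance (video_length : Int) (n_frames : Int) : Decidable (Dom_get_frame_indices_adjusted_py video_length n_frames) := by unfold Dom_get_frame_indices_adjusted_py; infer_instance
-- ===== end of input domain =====

-- B computes each index's repeat count in closed form (divmod) and emits the
-- sorted result directly in one pass, with no sort step (return value proved equal).

-- ===== PORT A =====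
def get_frame_indices_adjusted_py (video_length : Int) (n_frames : Int) : List Int :=
  let indices := PySem.List.pyRange 0 video_length 1
  let additional_frames_needed := n_frames - video_length
  let repeat_indices := (PySem.List.pyRange 0 additional_frames_needed 1).foldl
    (fun acc i => acc ++ [PySem.List.pyGetD indices (PySem.Int.mod i video_length) 0]) []
  let all_indices := indices ++ repeat_indices
  PySem.List.sorted all_indices (fun x => x)

-- ===== PORT B =====
def get_frame_indices_adjusted_py_alt (video_length : Int) (n_frames : Int) : List Int :=
  let extra := n_frames - video_length
  if extra ≤ 0 then PySem.List.pyRange 0 video_length 1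
  else
    let q := PySem.Int.floordiv extra video_length
    let r := PySem.Int.mod extra video_length
    (PySem.List.pyRange 0 video_length 1).foldl
      (fun acc i => acc ++ List.replicate (q + 1 + (if i < r then 1 else 0)).toNat i) []

-- ===== PRECONDITION & SPEC =====
-- Pre_ excludes exactly the inputs where A raises: video_length ≤ 0 with
-- n_frames > video_length (ZeroDivisionError for video_length = 0, IndexError for
-- video_length < 0, since indices is empty while repeats are demanded).
def Pre_get_frame_indices_adjusted_py (video_length : Int) (n_frames : Int) : Prop :=
  0 < video_length ∨ n_frames ≤ video_length
instance (video_length : Int) (n_frames : Int) : Decidable (Pre_get_frame_indices_adjusted_py video_length n_frames) := by unfold Pre_get_frame_indices_adjusted_py; infer_instance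

def pvWitness_get_frame_indices_adjusted_py : Int × Int := (3, 8)

def Spec_get_frame_indices_adjusted_py (video_length : Int) (n_frames : Int) (out : List Int) : Prop := out = get_frame_indices_adjusted_py_alt video_length n_frames
instance (video_length : Int) (n_frames : Int) (out : List Int) : Decidable (Spec_get_frame_indices_adjusted_py video_length n_frames out) := by unfold Spec_get_frame_indices_adjusted_py; infer_instance

-- ===== CLAIM (what is proved, stated in full; the proofs are below) =====
def Claim_equal_get_frame_indices_adjusted_py : Prop := ∀ (video_length : Int) (n_frames : Int), Dom_get_frame_indices_adjusted_py video_length n_frames → Pre_get_frame_indices_adjusted_py video_length n_frames → Spec_get_frame_indices_adjusted_py video_length n_frames (get_frame_indices_adjusted_py video_length n_frames)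

-- ===== LEMMAS AND PROOFS =====

-- one divmod step: how floordiv/mod at n+1 relate to floordiv/mod at n (positive divisor)
lemma pv_divmod_step (vl n : Int) (hvl : 0 < vl) :
    (PySem.Int.mod n vl + 1 = vl →
      PySem.Int.floordiv (n+1) vl = PySem.Int.floordiv n vl + 1 ∧ PySem.Int.mod (n+1) vl = 0) ∧
    (PySem.Int.mod n vl + 1 ≠ vl →
      PySem.Int.floordiv (n+1) vl = PySem.Int.floordiv n vl ∧ PySem.Int.mod (n+1) vl = PySem.Int.mod n vl + 1) := by
  have hqr := PySem.Int.floordiv_mul_add_mod n vl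
  have hr0 := PySem.Int.mod_nonneg n hvl
  have hrlt := PySem.Int.mod_lt n hvl
  set q := PySem.Int.floordiv n vl with hq
  set r := PySem.Int.mod n vl with hr
  constructor
  · intro h
    have hf : PySem.Int.floordiv (n+1) vl = q + 1 := by
      rw [PySem.Int.floordiv_eq_iff_of_pos hvl]
      have e1 : (q+1)*vl = q*vl + vl := by ring
      have e2 : (q+1+1)*vl = q*vl + vl + vl := by ring
      constructor <;> linarith
    refine ⟨hf, ?_⟩
    have h2 := PySem.Int.floordiv_mul_add_mod (n+1) vl
    rw [hf] at h2
    have e1 : (q+1)*vl = q*vl + vl := by ring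
    linarith
  · intro h
    have hf : PySem.Int.floordiv (n+1) vl = q := by
      rw [PySem.Int.floordiv_eq_iff_of_pos hvl]
      have e1 : (q+1)*vl = q*vl + vl := by ring
      constructor <;> [linarith; omega]
    refine ⟨hf, ?_⟩
    have h2 := PySem.Int.floordiv_mul_add_mod (n+1) vl
    rw [hf] at h2
    linarith

-- closed-form count of residues: #{k < n : k % vl = v}
lemma pv_count_mod_range (vl : Int) (hvl : 0 < vl) (n : Nat) (v : Int) :
    (((List.range n).map (fun (k : Nat) => PySem.Int.mod (k : Int) vl)).count v : Int)
      = if 0 ≤ v ∧ v < vl then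
          PySem.Int.floordiv (n : Int) vl + (if v < PySem.Int.mod (n : Int) vl then 1 else 0)
        else 0 := by
  induction n with
  | zero =>
    have hf : PySem.Int.floordiv 0 vl = 0 := by
      rw [PySem.Int.floordiv_eq_iff_of_pos hvl]
      exact ⟨by simp, by simpa using hvl⟩
    have hm : PySem.Int.mod 0 vl = 0 := by
      have := PySem.Int.floordiv_mul_add_mod 0 vl; rw [hf] at this; linarith
    simp [hf, hm]
    omega
  | succ m ih =>
    have hqr := PySem.Int.floordiv_mul_add_mod (m : Int) vl
    have hr0 := PySem.Int.mod_nonneg (m : Int) hvl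
    have hrlt := PySem.Int.mod_lt (m : Int) hvl
    have hstep := pv_divmod_step vl (m : Int) hvl
    rw [List.range_succ, List.map_append, List.count_append]
    push_cast
    rw [ih]
    simp only [List.map_cons, List.map_nil, List.count_cons, List.count_nil, beq_iff_eq]
    push_cast
    by_cases hcase : PySem.Int.mod (m : Int) vl + 1 = vl
    · obtain ⟨hf, hm⟩ := hstep.1 hcase
      rw [hf, hm]
      split_ifs <;> omega
    · obtain ⟨hf, hm⟩ := hstep.2 hcase
      rw [hf, hm]
      split_ifs <;> omega

-- count in B's block structure
lemma pv_count_flatMap_replicate (l : List Int) (c : Int → Nat) (v : Int) (hnd : l.Nodup) :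
    (l.flatMap (fun i => List.replicate (c i) i)).count v
      = if v ∈ l then c v else 0 := by
  induction l with
  | nil => simp
  | cons x t ih =>
    rcases List.nodup_cons.mp hnd with ⟨hx, ht⟩
    simp only [List.flatMap_cons, List.count_append, ih ht, List.count_replicate, List.mem_cons]
    by_cases hv : x = v
    · subst hv; simp [hx]
    · simp [hv, Ne.symm hv]

-- B's output is weakly increasing
lemma pv_flatMap_replicate_pairwise (l : List Int) (c : Int → Nat)
    (hl : l.Pairwise (· < ·)) :
    (l.flatMap (fun i => List.replicate (c i) i)).Pairwise (· ≤ ·) := by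
  induction l with
  | nil => simp
  | cons x t ih =>
    rcases List.pairwise_cons.mp hl with ⟨hx, ht⟩
    simp only [List.flatMap_cons]
    rw [List.pairwise_append]
    refine ⟨List.pairwise_replicate.mpr (Or.inr le_rfl), ih ht, ?_⟩
    intro a ha b hb
    rcases List.eq_of_mem_replicate ha with rfl
    rcases List.mem_flatMap.mp hb with ⟨y, hy, hby⟩
    rcases List.eq_of_mem_replicate hby with rfl
    exact le_of_lt (hx _ hy)

-- ===== VERDICT (by name: the statement is the Claim_ definition above) =====
theorem get_frame_indices_adjusted_py_spec : Claim_equal_get_frame_indices_adjusted_py := by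
  intro vl n _ hpre
  unfold Spec_get_frame_indices_adjusted_py
  unfold get_frame_indices_adjusted_py get_frame_indices_adjusted_py_alt
  simp only []
  by_cases hle : n - vl ≤ 0
  · -- no extra frames: repeats empty, sort of a sorted range is itself
    rw [if_pos hle, PySem.List.pyRange_one_eq_nil (by omega : n - vl ≤ (0:Int))]
    simp only [List.foldl_nil, List.append_nil]
    exact PySem.List.sorted_eq_self_of_pairwise _ _
      ((PySem.List.pairwise_lt_pyRange_one 0 vl).imp le_of_lt)
  · rw [if_neg hle]
    have hvl : 0 < vl := by rcases hpre with h | h <;> omega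
    have hex : 0 < n - vl := by omega
    set extra := n - vl with hextra
    set q := PySem.Int.floordiv extra vl with hq
    set r := PySem.Int.mod extra vl with hr
    -- B's list as a flatMap
    rw [PySem.List.foldl_append_singleton_eq_map]
    rw [PySem.List.foldl_append_eq_flatMap]
    simp only [List.nil_append]
    -- the sorted order is named by: B's list is a ≤-sorted permutation of A's multiset
    apply PySem.List.sorted_id_eq_of_perm_of_pairwise
    · -- permutation, by counting each value
      rw [List.perm_iff_count]
      intro v
      have hB := pv_count_flatMap_replicate (PySem.List.pyRange 0 vl 1)
        (fun i => (q + 1 + (if i < r then 1 else 0)).toNat) v (PySem.List.nodup_pyRange_one 0 vl)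
      rw [hB, List.count_append]
      -- A's repeat list is the residues of range(extra)
      have hrep : (PySem.List.pyRange 0 extra 1).map
            (fun i => PySem.List.pyGetD (PySem.List.pyRange 0 vl 1) (PySem.Int.mod i vl) 0)
          = (List.range extra.toNat).map (fun (k : Nat) => PySem.Int.mod (k : Int) vl) := by
        rw [PySem.List.pyRange_one 0 extra, List.map_map]
        simp only [Int.sub_zero]
        apply List.map_congr_left
        intro k _
        simp only [Function.comp_apply, zero_add]
        have h0 : 0 ≤ PySem.Int.mod (k : Int) vl := PySem.Int.mod_nonneg _ hvl
        have h1 : PySem.Int.mod (k : Int) vl < vl := PySem.Int.mod_lt _ hvl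
        rw [PySem.List.pyGetD_of_nonneg _ _ h0]
        have hlen : (PySem.Int.mod (k : Int) vl).toNat < (PySem.List.pyRange 0 vl 1).length := by
          rw [PySem.List.length_pyRange_one]; omega
        rw [List.getD_eq_getElem _ _ hlen, PySem.List.getElem_pyRange_one 0 vl _ hlen]
        omega
      rw [hrep]
      have hcnt := pv_count_mod_range vl hvl extra.toNat v
      rw [(by omega : ((extra.toNat : Nat) : Int) = extra)] at hcnt
      rw [← hq, ← hr] at hcnt
      -- q ≥ 0 since extra > 0 and vl > 0
      have hq0 : 0 ≤ q := by
        have hqr := PySem.Int.floordiv_mul_add_mod extra vl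
        have hr0 : 0 ≤ r := PySem.Int.mod_nonneg _ hvl
        have hrlt : r < vl := PySem.Int.mod_lt _ hvl
        rw [← hq, ← hr] at hqr
        by_contra hneg
        have h1 : q ≤ -1 := by omega
        have : q * vl ≤ (-1) * vl := mul_le_mul_of_nonneg_right h1 hvl.le
        linarith
      by_cases hm : v ∈ PySem.List.pyRange 0 vl 1
      · have hv : 0 ≤ v ∧ v < vl := by
          have := (PySem.List.mem_pyRange_one).mp hm; omega
        rw [if_pos hm, List.count_eq_one_of_mem (PySem.List.nodup_pyRange_one 0 vl) hm]
        rw [if_pos hv] at hcnt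
        beta_reduce
        split_ifs with h
        · rw [if_pos h] at hcnt; omega
        · rw [if_neg h] at hcnt; omega
      · have hv : ¬ (0 ≤ v ∧ v < vl) := by
          intro hc; exact hm ((PySem.List.mem_pyRange_one).mpr ⟨hc.1, hc.2⟩)
        rw [if_neg hm, List.count_eq_zero_of_not_mem hm]
        rw [if_neg hv] at hcnt
        omega
    · exact pv_flatMap_replicate_pairwise _ _ (PySem.List.pairwise_lt_pyRange_one 0 vl)
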